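-- pv_equiv track=rewrite | github.com/Lucas-Guimaraes/Reddit-Daily-Programmer | Easy Problems/81-90/86easy.py | length_encoding
-- ===== SOURCE A (Python) =====
-- def length_encoding(before):
--     last_letter = ''
--     encode = []
--
--
--     for letter in before:
--         #If in alphabet
--         if letter.isalpha():
--             #We unique
--             if letter != last_letter:
--                 lst = [letter, 1]
--                 encode.append(lst)
--             #If the same as last letter
--             else:
--                 encode[-1][1] += 1
--         #If not in alphabet
--         else:
--             continue
--         #assigning last letter
--         last_letter = letter
--     return encode
-- ===== SOURCE B (Python) =====
-- def length_encoding(before):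
--     # phase 1: keep only the letters; phase 2: split into runs with an inner scan
--     letters = [c for c in before if c.isalpha()]
--     encode = []
--     while letters:
--         run = 1
--         while run < len(letters) and letters[run] == letters[0]:
--             run += 1
--         encode.append([letters[0], run])
--         letters = letters[run:]
--     return encode
-- ===== Notes on version B (the rewrite author's own statement) =====
-- stated objective: alternative
-- what changed: B first filters the string down to its letters, then splits that list into maximal runs with an inner scan per run, instead of A's single state-machine pass that tracks the previous letter and mutates the count of the last emitted entry.
import Mathlib
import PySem

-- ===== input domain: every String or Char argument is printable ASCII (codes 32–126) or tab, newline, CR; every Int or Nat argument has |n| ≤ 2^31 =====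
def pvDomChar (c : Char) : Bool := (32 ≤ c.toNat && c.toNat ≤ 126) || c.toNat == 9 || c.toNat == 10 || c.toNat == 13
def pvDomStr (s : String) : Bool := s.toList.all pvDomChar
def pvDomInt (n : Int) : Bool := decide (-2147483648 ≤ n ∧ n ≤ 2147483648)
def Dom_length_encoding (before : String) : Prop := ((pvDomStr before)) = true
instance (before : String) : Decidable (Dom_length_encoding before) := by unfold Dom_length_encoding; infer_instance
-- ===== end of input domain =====

-- B filters the string down to its letters first, then splits that list into maximal
-- runs (inner scan per run), instead of A's one-pass state machine that tracks the
-- previous letter and increments the count of the last emitted entry ('alternative').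

-- ===== PORT A =====
-- encode[-1][1] += 1 : increment the count of the LAST entry (A's loop only reaches
-- it when encode is nonempty, so the [] case is unreachable)
def pvIncLast : List (String × Int) → List (String × Int)
  | [] => []
  | [(s, n)] => [(s, n + 1)]
  | x :: xs => x :: pvIncLast xs

-- the for-loop over the characters of `before`, state = (last_letter, encode)
def pvLoopA : List Char → String → List (String × Int) → List (String × Int)
  | [], _, encode => encode
  | letter :: rest, last_letter, encode =>
    if PySem.Chars.isalpha letter then
      if String.ofList [letter] ≠ last_letter then
        pvLoopA rest (String.ofList [letter]) (encode ++ [(String.ofList [letter], 1)])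
      else
        pvLoopA rest last_letter (pvIncLast encode)
    else
      pvLoopA rest last_letter encode

def length_encoding (before : String) : List (String × Int) :=
  pvLoopA before.toList "" []

-- ===== PORT B =====
-- the outer while-loop: take one maximal run off the front, recurse on the rest
def pvRunsB : List Char → List (String × Int)
  | [] => []
  | c :: cs =>
    (String.ofList [c], 1 + ((cs.takeWhile (· == c)).length : Int))
      :: pvRunsB (cs.dropWhile (· == c))
  termination_by l => l.length
  decreasing_by
    simp only [List.length_cons]
    exact Nat.lt_succ_of_le (List.length_dropWhile_le _ _)

def length_encoding_alt (before : String) : List (String × Int) :=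
  pvRunsB (before.toList.filter (fun c => PySem.Chars.isalpha c))

-- ===== PRECONDITION & SPEC =====
def Spec_length_encoding (before : String) (out : List (String × Int)) : Prop := out = length_encoding_alt before
instance (before : String) (out : List (String × Int)) : Decidable (Spec_length_encoding before out) := by unfold Spec_length_encoding; infer_instance

-- ===== CLAIM (what is proved, stated in full; the proofs are below) =====
def Claim_equal_length_encoding : Prop := ∀ (before : String), Dom_length_encoding before → Spec_length_encoding before (length_encoding before)

-- ===== LEMMAS AND PROOFS =====

-- reference run-grouper that merges the pending run (s, n) at the front
def pvRunsAux : String × Int → List Char → List (String × Int)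
  | p, [] => [p]
  | (s, n), c :: cs =>
    if String.ofList [c] = s then pvRunsAux (s, n + 1) cs
    else (s, n) :: pvRunsAux (String.ofList [c], 1) cs

theorem pvIncLast_append (enc : List (String × Int)) (s : String) (n : Int) :
    pvIncLast (enc ++ [(s, n)]) = enc ++ [(s, n + 1)] := by
  induction enc with
  | nil => simp [pvIncLast]
  | cons x xs ih =>
      cases xs with
      | nil => simp [pvIncLast, pvIncLast_append]
      | cons y ys => simpa [pvIncLast] using ih

theorem pvMk_singleton_inj {a b : Char} (h : String.ofList [a] = String.ofList [b]) : a = b := by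
  have := congrArg String.toList h
  simp only [String.toList_ofList, List.cons.injEq, and_true] at this
  exact this

theorem pvLoopA_spec (l : List Char) :
    ∀ (s : String) (n : Int) (enc : List (String × Int)),
    pvLoopA l s (enc ++ [(s, n)]) =
      enc ++ pvRunsAux (s, n) (l.filter (fun c => PySem.Chars.isalpha c)) := by
  induction l with
  | nil => intro s n enc; simp [pvLoopA, pvRunsAux]
  | cons c cs ih =>
      intro s n enc
      by_cases ha : PySem.Chars.isalpha c
      · by_cases he : String.ofList [c] = s
        · subst he
          simp [pvLoopA, ha, pvRunsAux, pvIncLast_append, ih]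
        · have : pvLoopA (c :: cs) s (enc ++ [(s, n)]) =
              pvLoopA cs (String.ofList [c]) ((enc ++ [(s, n)]) ++ [(String.ofList [c], 1)]) := by
            simp [pvLoopA, ha, he]
          rw [this, ih]
          simp [pvRunsAux, ha, he]
      · simp [pvLoopA, ha, ih]

theorem pvMk_ne_empty (c : Char) : String.ofList [c] ≠ "" := by
  intro h
  have := congrArg String.toList h
  simp [String.toList_ofList] at this

theorem pvRunsAux_eq (l : List Char) :
    ∀ (c : Char) (n : Int),
    pvRunsAux (String.ofList [c], n) l =
      (String.ofList [c], n + ((l.takeWhile (· == c)).length : Int))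
        :: pvRunsB (l.dropWhile (· == c)) := by
  induction l with
  | nil => intro c n; simp [pvRunsAux, pvRunsB]
  | cons d ds ih =>
      intro c n
      by_cases h : d = c
      · subst h
        have hstep : pvRunsAux (String.ofList [d], n) (d :: ds) =
            pvRunsAux (String.ofList [d], n + 1) ds := by simp [pvRunsAux]
        rw [hstep, ih]
        simp [List.takeWhile_cons, List.dropWhile_cons]
        push_cast
        ring
      · have hb : (d == c) = false := by simp [h]
        have hne : String.ofList [d] ≠ String.ofList [c] := fun hh => h (pvMk_singleton_inj hh)
        simp [pvRunsAux, hne, ih, List.takeWhile_cons, List.dropWhile_cons, hb, pvRunsB]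

theorem pvLoopA_start (l : List Char) :
    pvLoopA l "" [] = pvRunsB (l.filter (fun c => PySem.Chars.isalpha c)) := by
  induction l with
  | nil => simp [pvLoopA, pvRunsB]
  | cons c cs ih =>
      by_cases ha : PySem.Chars.isalpha c
      · have hne : String.ofList [c] ≠ "" := pvMk_ne_empty c
        have h1 : pvLoopA (c :: cs) "" [] =
            pvLoopA cs (String.ofList [c]) ([] ++ [(String.ofList [c], (1 : Int))]) := by
          simp [pvLoopA, ha, hne]
        rw [h1, pvLoopA_spec]
        simp only [List.nil_append, pvRunsAux_eq]
        simp [List.filter_cons, ha, pvRunsB]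
      · simp [pvLoopA, ha, ih, List.filter_cons]

-- ===== VERDICT (by name: the statement is the Claim_ definition above) =====
theorem length_encoding_spec : Claim_equal_length_encoding := by
  intro before _
  unfold Spec_length_encoding length_encoding length_encoding_alt
  exact pvLoopA_start before.toList
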